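-- pv_equiv track=rewrite | github.com/Tar-ive/porthon | src/backend/app/api/v1/approvals.py | _find_approval
-- ===== SOURCE A (Python) =====
-- def _find_approval(approvals: list, approval_id: str) -> dict | None:
--     """Find approval by ID, handling both prefixed and non-prefixed IDs."""
--     # First try exact match
--     for a in approvals:
--         if a.get("approval_id") == approval_id:
--             return a
--
--     # Try stripped prefix
--     if approval_id.startswith("apprv_"):
--         stripped = approval_id[6:]
--         for a in approvals:
--             if a.get("approval_id") == stripped:
--                 return a
--
--     # Try with prefix added
--     if not approval_id.startswith("apprv_"):
--         prefixed = f"apprv_{approval_id}"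
--         for a in approvals:
--             if a.get("approval_id") == prefixed:
--                 return a
--
--     return None
-- ===== SOURCE B (Python) =====
-- def _find_approval(approvals: list, approval_id: str) -> dict | None:
--     """Find approval by ID, handling both prefixed and non-prefixed IDs."""
--     # The alternate id to accept: stripped if prefixed, prefixed otherwise.
--     if approval_id.startswith("apprv_"):
--         alt = approval_id[6:]
--     else:
--         alt = "apprv_" + approval_id
--     exact_hit = None
--     alt_hit = None
--     # One scan, remembering the FIRST element matching each target.
--     for a in approvals:
--         k = a.get("approval_id")
--         if exact_hit is None and k == approval_id:
--             exact_hit = a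
--         if alt_hit is None and k == alt:
--             alt_hit = a
--     return exact_hit if exact_hit is not None else alt_hit
-- ===== Notes on version B (the rewrite author's own statement) =====
-- stated objective: alternative
-- what changed: Replaces A's three staged rescans of the list with a single pass carrying two first-match accumulators (exact id and the precomputed stripped/prefixed alternate id), then picks exact over alternate.
import Mathlib
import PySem

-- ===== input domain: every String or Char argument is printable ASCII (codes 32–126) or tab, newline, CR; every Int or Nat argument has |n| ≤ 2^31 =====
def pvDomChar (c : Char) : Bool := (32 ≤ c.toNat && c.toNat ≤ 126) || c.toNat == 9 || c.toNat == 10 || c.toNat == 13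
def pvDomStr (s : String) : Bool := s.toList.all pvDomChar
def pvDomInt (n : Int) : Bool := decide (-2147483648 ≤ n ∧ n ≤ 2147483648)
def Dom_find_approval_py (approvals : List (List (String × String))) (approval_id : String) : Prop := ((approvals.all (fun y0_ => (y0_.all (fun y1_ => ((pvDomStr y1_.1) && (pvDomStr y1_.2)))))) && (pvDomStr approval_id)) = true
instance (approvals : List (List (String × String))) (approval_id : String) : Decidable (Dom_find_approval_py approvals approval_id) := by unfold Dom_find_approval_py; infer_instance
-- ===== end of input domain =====

-- B replaces A's three staged rescans by one pass with two first-match accumulators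
-- (exact id and the precomputed stripped/prefixed alternate id); objective: alternative
-- decomposition, same asymptotic cost.

-- ===== PORT A =====
-- a.get("approval_id") on the assoc-list dict a
def pvGetId (a : List (String × String)) : Option String :=
  (PySem.Dict.mk a).get? "approval_id"

def find_approval_py (approvals : List (List (String × String))) (approval_id : String) : Option (List (String × String)) :=
  -- first loop: exact match
  match approvals.find? (fun a => pvGetId a == some approval_id) with
  | some a => some a
  | none =>
    -- second loop, guarded by startswith("apprv_"): stripped id
    match (if PySem.Str.startswith approval_id "apprv_" then
             approvals.find? (fun a => pvGetId a == some (PySem.Str.slice approval_id (some 6) none))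
           else none) with
    | some a => some a
    | none =>
      -- third loop, guarded by NOT startswith: prefixed id
      if !PySem.Str.startswith approval_id "apprv_" then
        approvals.find? (fun a => pvGetId a == some ("apprv_" ++ approval_id))
      else none

-- ===== PORT B =====
-- loop body: update the two first-match accumulators with element a
def pvStep (approval_id alt : String)
    (st : Option (List (String × String)) × Option (List (String × String)))
    (a : List (String × String)) :
    Option (List (String × String)) × Option (List (String × String)) :=
  let k := pvGetId a
  ((if st.1.isNone && (k == some approval_id) then some a else st.1),
   (if st.2.isNone && (k == some alt) then some a else st.2))

def find_approval_py_alt (approvals : List (List (String × String))) (approval_id : String) : Option (List (String × String)) :=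
  let alt := if PySem.Str.startswith approval_id "apprv_"
             then PySem.Str.slice approval_id (some 6) none
             else "apprv_" ++ approval_id
  let st := approvals.foldl (pvStep approval_id alt) (none, none)
  match st.1 with
  | some a => some a
  | none => st.2

-- ===== PRECONDITION & SPEC =====
def Spec_find_approval_py (approvals : List (List (String × String))) (approval_id : String) (out : Option (List (String × String))) : Prop := out = find_approval_py_alt approvals approval_id
instance (approvals : List (List (String × String))) (approval_id : String) (out : Option (List (String × String))) : Decidable (Spec_find_approval_py approvals approval_id out) := by unfold Spec_find_approval_py; infer_instance

-- ===== CLAIM (what is proved, stated in full; the proofs are below) =====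
def Claim_equal_find_approval_py : Prop := ∀ (approvals : List (List (String × String))) (approval_id : String), Dom_find_approval_py approvals approval_id → Spec_find_approval_py approvals approval_id (find_approval_py approvals approval_id)

-- ===== LEMMAS AND PROOFS =====

-- the fold's two accumulators are exactly "initial value, else first match of each target"
theorem pvFold_eq (xs : List (List (String × String))) (approval_id alt : String)
    (e h : Option (List (String × String))) :
    xs.foldl (pvStep approval_id alt) (e, h) =
      (e.or (xs.find? (fun a => pvGetId a == some approval_id)),
       h.or (xs.find? (fun a => pvGetId a == some alt))) := by
  induction xs generalizing e h with
  | nil => simp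
  | cons a xs ih =>
    rw [List.foldl_cons, ih, List.find?_cons, List.find?_cons]
    unfold pvStep
    cases e <;> cases h <;>
      cases hp : (pvGetId a == some approval_id) <;>
      cases hq : (pvGetId a == some alt) <;> simp [hp, hq]

-- ===== VERDICT (by name: the statement is the Claim_ definition above) =====
theorem find_approval_py_spec : Claim_equal_find_approval_py := by
  intro approvals approval_id _
  unfold Spec_find_approval_py
  simp only [find_approval_py, find_approval_py_alt, pvFold_eq, Option.none_or]
  cases h1 : approvals.find? (fun a => pvGetId a == some approval_id) with
  | some a => simp
  | none =>
    cases hs : PySem.Str.startswith approval_id "apprv_" with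
    | true =>
      cases h2 : approvals.find? (fun a => pvGetId a == some (PySem.Str.slice approval_id (some 6) none)) <;>
        simp [h2]
    | false => simp
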